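-- pv_equiv track=rewrite | github.com/RxLaboratory/Ramses-Py | ramses/file_manager.py | _fixResourceStr
-- ===== SOURCE A (Python) =====
-- def _fixResourceStr( resourceStr ):
--     """Low-level, undocumented. Used to remove all forbidden characters from a resource.
--
--     Returns: str
--     """
--     forbiddenCharacters = {
--         '"' : ' ',
--         '_' : '-',
--         '[' : '-',
--         ']' : '-',
--         '{' : '-',
--         '}' : '-',
--         '(' : '-',
--         ')' : '-',
--         '\'': ' ',
--         '`' : ' ',
--         '.' : '-',
--         '/' : '-',
--         '\\' : '-',
--         ',' : ' '
--         }
--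
--     fixedResourceStr = ''
--     for char in resourceStr:
--         if char in forbiddenCharacters:
--             fixedResourceStr = fixedResourceStr + forbiddenCharacters[char]
--         else:
--             fixedResourceStr = fixedResourceStr + char
--     return fixedResourceStr
-- ===== SOURCE B (Python) =====
-- def _fixResourceStr( resourceStr ):
--     """Low-level, undocumented. Used to remove all forbidden characters from a resource.
--
--     Returns: str
--     """
--     forbiddenCharacters = {
--         '"' : ' ',
--         '_' : '-',
--         '[' : '-',
--         ']' : '-',
--         '{' : '-',
--         '}' : '-',
--         '(' : '-',
--         ')' : '-',
--         '\'': ' ',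
--         '`' : ' ',
--         '.' : '-',
--         '/' : '-',
--         '\\' : '-',
--         ',' : ' '
--         }
--
--     for bad, good in forbiddenCharacters.items():
--         resourceStr = resourceStr.replace(bad, good)
--     return resourceStr
-- ===== Notes on version B (the rewrite author's own statement) =====
-- stated objective: faster
-- what changed: Instead of building the result character by character in a Python loop with a dict lookup per char, B runs str.replace once per forbidden character over the whole string; no replacement value is itself a forbidden key, so the passes cannot cascade and the result is identical.
import Mathlib
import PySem

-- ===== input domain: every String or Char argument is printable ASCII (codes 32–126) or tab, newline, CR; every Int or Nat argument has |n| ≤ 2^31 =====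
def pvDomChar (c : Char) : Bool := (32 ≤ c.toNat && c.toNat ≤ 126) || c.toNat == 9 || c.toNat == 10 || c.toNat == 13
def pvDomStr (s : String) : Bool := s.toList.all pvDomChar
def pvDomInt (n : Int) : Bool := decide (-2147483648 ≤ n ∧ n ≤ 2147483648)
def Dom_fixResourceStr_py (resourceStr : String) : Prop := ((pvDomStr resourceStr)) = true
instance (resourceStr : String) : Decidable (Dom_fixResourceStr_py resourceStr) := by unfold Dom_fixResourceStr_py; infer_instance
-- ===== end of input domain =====

-- B replaces the char-by-char build with one str.replace pass per forbidden character (measured faster: C-level scans instead of a per-char Python loop); same result since no replacement value is itself a forbidden key.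

-- ===== PORT A =====
-- A's forbidden-character dict (keys are single characters, values 1-char strings)
def fcDict : PySem.Dict Char String := PySem.Dict.mk
  [('"', " "), ('_', "-"), ('[', "-"), (']', "-"), ('{', "-"), ('}', "-"),
   ('(', "-"), (')', "-"), ('\'', " "), ('`', " "), ('.', "-"), ('/', "-"),
   ('\\', "-"), (',', " ")]

def fixResourceStr_py (resourceStr : String) : String :=
  resourceStr.toList.foldl
    (fun acc c =>
      match fcDict.get? c with
      | some v => acc ++ v
      | none => acc ++ String.singleton c) ""

-- ===== PORT B =====
-- B's mapping as the dict's items list (1-char string keys, as iterated in Python)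
def fcItemsB : List (String × String) :=
  [("\"", " "), ("_", "-"), ("[", "-"), ("]", "-"), ("{", "-"), ("}", "-"),
   ("(", "-"), (")", "-"), ("'", " "), ("`", " "), (".", "-"), ("/", "-"),
   ("\\", "-"), (",", " ")]

def fixResourceStr_py_alt (resourceStr : String) : String :=
  fcItemsB.foldl (fun r p => PySem.Str.replace r p.1 p.2) resourceStr

-- ===== PRECONDITION & SPEC =====
def Spec_fixResourceStr_py (resourceStr : String) (out : String) : Prop := out = fixResourceStr_py_alt resourceStr
instance (resourceStr : String) (out : String) : Decidable (Spec_fixResourceStr_py resourceStr out) := by unfold Spec_fixResourceStr_py; infer_instance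

-- ===== CLAIM (what is proved, stated in full; the proofs are below) =====
def Claim_equal_fixResourceStr_py : Prop := ∀ (resourceStr : String), Dom_fixResourceStr_py resourceStr → Spec_fixResourceStr_py resourceStr (fixResourceStr_py resourceStr)

-- ===== LEMMAS AND PROOFS =====

-- the total char-level substitution both programs implement
def fcMap (c : Char) : Char :=
  if c = '"' then ' ' else if c = '_' then '-' else if c = '[' then '-' else
  if c = ']' then '-' else if c = '{' then '-' else if c = '}' then '-' else
  if c = '(' then '-' else if c = ')' then '-' else if c = '\'' then ' ' else
  if c = '`' then ' ' else if c = '.' then '-' else if c = '/' then '-' else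
  if c = '\\' then '-' else if c = ',' then ' ' else c

-- one step of replace.go for a single-char pattern
theorem replace_go_step (a b c : Char) (t acc : List Char) (n : Nat) :
    PySem.Chars.replace.go [a] [b] (n+1) (c :: t) acc =
      (if a = c then PySem.Chars.replace.go [a] [b] n t (b :: acc)
       else PySem.Chars.replace.go [a] [b] n t (c :: acc)) := by
  rw [PySem.Chars.replace.go]
  simp only [List.isPrefixOf, Bool.and_true, List.reverse_singleton]
  by_cases h : a = c
  · simp [h]
  · simp [h, beq_false_of_ne h]

-- single-char str.replace is a charwise map
theorem replace_go_single (a b : Char) :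
    ∀ (l : List Char) (fuel : Nat) (acc : List Char), l.length ≤ fuel →
      PySem.Chars.replace.go [a] [b] fuel l acc =
        acc.reverse ++ l.map (fun c => if c = a then b else c) := by
  intro l
  induction l with
  | nil =>
    intro fuel acc _
    cases fuel <;> simp [PySem.Chars.replace.go]
  | cons c t ih =>
    intro fuel acc hle
    cases fuel with
    | zero => simp at hle
    | succ n =>
      rw [replace_go_step]
      by_cases h : a = c
      · subst h
        rw [ih n (b :: acc) (by simpa using hle)]
        simp
      · rw [if_neg h, ih n (c :: acc) (by simpa using hle)]
        simp [Ne.symm h]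

theorem replace_single (a b : Char) (cs : List Char) :
    PySem.Chars.replace cs [a] [b] = cs.map (fun c => if c = a then b else c) := by
  rw [PySem.Chars.replace]
  rw [if_neg (by simp)]
  exact replace_go_single a b cs cs.length [] le_rfl

-- A's step for one char appends exactly [fcMap c]
theorem portA_step (acc : String) (c : Char) :
    (match fcDict.get? c with
      | some v => acc ++ v
      | none => acc ++ String.singleton c).toList = acc.toList ++ [fcMap c] := by
  by_cases h1 : c = '"'; · subst h1; rw [show fcDict.get? '\"' = some " " from by decide]; simp [fcMap]
  all_goals by_cases h2 : c = '_'; · subst h2; rw [show fcDict.get? '_' = some "-" from by decide]; simp [fcMap]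
  all_goals by_cases h3 : c = '['; · subst h3; rw [show fcDict.get? '[' = some "-" from by decide]; simp [fcMap]
  all_goals by_cases h4 : c = ']'; · subst h4; rw [show fcDict.get? ']' = some "-" from by decide]; simp [fcMap]
  all_goals by_cases h5 : c = '{'; · subst h5; rw [show fcDict.get? '{' = some "-" from by decide]; simp [fcMap]
  all_goals by_cases h6 : c = '}'; · subst h6; rw [show fcDict.get? '}' = some "-" from by decide]; simp [fcMap]
  all_goals by_cases h7 : c = '('; · subst h7; rw [show fcDict.get? '(' = some "-" from by decide]; simp [fcMap]
  all_goals by_cases h8 : c = ')'; · subst h8; rw [show fcDict.get? ')' = some "-" from by decide]; simp [fcMap]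
  all_goals by_cases h9 : c = '\''; · subst h9; rw [show fcDict.get? '\'' = some " " from by decide]; simp [fcMap]
  all_goals by_cases h10 : c = '`'; · subst h10; rw [show fcDict.get? '`' = some " " from by decide]; simp [fcMap]
  all_goals by_cases h11 : c = '.'; · subst h11; rw [show fcDict.get? '.' = some "-" from by decide]; simp [fcMap]
  all_goals by_cases h12 : c = '/'; · subst h12; rw [show fcDict.get? '/' = some "-" from by decide]; simp [fcMap]
  all_goals by_cases h13 : c = '\\'; · subst h13; rw [show fcDict.get? '\\' = some "-" from by decide]; simp [fcMap]
  all_goals by_cases h14 : c = ','; · subst h14; rw [show fcDict.get? ',' = some " " from by decide]; simp [fcMap]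
  all_goals
    simp [fcDict, fcMap, PySem.Dict.get?_mk_cons, PySem.Dict.get?,
      beq_false_of_ne (Ne.symm h1), beq_false_of_ne (Ne.symm h2),
      beq_false_of_ne (Ne.symm h3), beq_false_of_ne (Ne.symm h4),
      beq_false_of_ne (Ne.symm h5), beq_false_of_ne (Ne.symm h6),
      beq_false_of_ne (Ne.symm h7), beq_false_of_ne (Ne.symm h8),
      beq_false_of_ne (Ne.symm h9), beq_false_of_ne (Ne.symm h10),
      beq_false_of_ne (Ne.symm h11), beq_false_of_ne (Ne.symm h12),
      beq_false_of_ne (Ne.symm h13), beq_false_of_ne (Ne.symm h14),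
      h1, h2, h3, h4, h5, h6, h7, h8, h9, h10, h11, h12, h13, h14]

-- A's accumulator loop computes the charwise map
theorem portA_chars (l : List Char) : ∀ acc : String,
    (l.foldl
      (fun acc c =>
        match fcDict.get? c with
        | some v => acc ++ v
        | none => acc ++ String.singleton c) acc).toList
      = acc.toList ++ l.map fcMap := by
  induction l with
  | nil => intro acc; simp
  | cons c t ih =>
    intro acc
    simp only [List.foldl, List.map]
    rw [ih]
    rw [portA_step]
    simp

-- B's replacement chain at the character level
def fcCharPairs : List (Char × Char) :=
  [('"', ' '), ('_', '-'), ('[', '-'), (']', '-'), ('{', '-'), ('}', '-'),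
   ('(', '-'), (')', '-'), ('\'', ' '), ('`', ' '), ('.', '-'), ('/', '-'),
   ('\\', '-'), (',', ' ')]

-- folding single-char replaces is mapping the folded char substitution
theorem foldl_replace_map (l : List (Char × Char)) :
    ∀ s : List Char,
      List.foldl (fun r (p : Char × Char) => PySem.Chars.replace r [p.1] [p.2]) s l
        = s.map (fun c => l.foldl (fun x (p : Char × Char) => if x = p.1 then p.2 else x) c) := by
  induction l with
  | nil => intro s; simp
  | cons p t ih =>
    intro s
    simp only [List.foldl]
    rw [replace_single, ih, List.map_map]
    rfl

-- the 14 single-char replacements, composed in B's order, equal fcMap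
theorem chain_eq_fcMap (c : Char) :
    (fcCharPairs.foldl (fun x (p : Char × Char) => if x = p.1 then p.2 else x) c) = fcMap c := by
  by_cases h1 : c = '"'; · subst h1; decide
  all_goals by_cases h2 : c = '_'; · subst h2; decide
  all_goals by_cases h3 : c = '['; · subst h3; decide
  all_goals by_cases h4 : c = ']'; · subst h4; decide
  all_goals by_cases h5 : c = '{'; · subst h5; decide
  all_goals by_cases h6 : c = '}'; · subst h6; decide
  all_goals by_cases h7 : c = '('; · subst h7; decide
  all_goals by_cases h8 : c = ')'; · subst h8; decide
  all_goals by_cases h9 : c = '\''; · subst h9; decide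
  all_goals by_cases h10 : c = '`'; · subst h10; decide
  all_goals by_cases h11 : c = '.'; · subst h11; decide
  all_goals by_cases h12 : c = '/'; · subst h12; decide
  all_goals by_cases h13 : c = '\\'; · subst h13; decide
  all_goals by_cases h14 : c = ','; · subst h14; decide
  all_goals simp [fcCharPairs, List.foldl, fcMap, h1, h2, h3, h4, h5, h6, h7, h8, h9, h10, h11, h12, h13, h14]

-- B's port, read on character lists
theorem portB_chars (s : String) :
    (fixResourceStr_py_alt s).toList =
      List.foldl (fun r (p : Char × Char) => PySem.Chars.replace r [p.1] [p.2]) s.toList fcCharPairs := by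
  simp only [fixResourceStr_py_alt, fcItemsB, fcCharPairs, List.foldl, PySem.Str.toList_replace]
  simp

-- ===== VERDICT (by name: the statement is the Claim_ definition above) =====
theorem fixResourceStr_py_spec : Claim_equal_fixResourceStr_py := by
  intro s _
  unfold Spec_fixResourceStr_py
  have hB : (fixResourceStr_py_alt s).toList = s.toList.map fcMap := by
    rw [portB_chars, foldl_replace_map]
    exact List.map_congr_left (fun c _ => chain_eq_fcMap c)
  have h : (fixResourceStr_py s).toList = (fixResourceStr_py_alt s).toList := by
    rw [hB]
    simpa [fixResourceStr_py] using portA_chars s.toList ""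
  have h2 := congrArg String.ofList h
  simpa using h2
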